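-- pv_equiv track=rewrite | github.com/GavinRuff007/Quera-Answer | python/جوس.py | rotary_search
-- ===== SOURCE A (Python) =====
-- def rotary_search(pat, txt):
--     M = len(pat)
--     N = len(txt)
--     for i in range(N):
--         match = True
--         for j in range(M):
--             if txt[(i+j)%N] != pat[j]:
--                 match = False
--                 break
--         if match:
--             return True
--     return False
-- ===== SOURCE B (Python) =====
-- def rotary_search(pat, txt):
--     n = len(txt)
--     if n == 0:
--         return False
--     m = len(pat)
--     ext = (txt * (2 + m // n))[:n + m - 1]
--     return pat in ext
-- ===== Notes on version B (the rewrite author's own statement) =====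
-- stated objective: faster
-- what changed: Replaces the Python-level double loop with modular indexing by one substring test 'pat in ext' on the text repeated and truncated to length N+M-1, so the search is a single C-level scan.
import Mathlib
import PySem

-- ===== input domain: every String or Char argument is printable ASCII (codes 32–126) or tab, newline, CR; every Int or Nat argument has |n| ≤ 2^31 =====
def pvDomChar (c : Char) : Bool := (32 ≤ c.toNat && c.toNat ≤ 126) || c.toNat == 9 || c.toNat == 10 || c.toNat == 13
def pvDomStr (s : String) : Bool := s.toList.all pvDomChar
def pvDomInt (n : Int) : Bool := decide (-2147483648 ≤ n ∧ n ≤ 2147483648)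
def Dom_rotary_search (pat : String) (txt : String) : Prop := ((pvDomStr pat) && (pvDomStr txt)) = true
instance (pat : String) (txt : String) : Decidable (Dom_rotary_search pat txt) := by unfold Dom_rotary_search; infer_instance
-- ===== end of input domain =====

-- B replaces A's nested modular-index loops by one substring test on the text repeated and truncated to length N+M-1 (objective: faster).

-- ===== PORT A =====
-- inner loop: for j in range(M): if txt[(i+j)%N] != pat[j]: match=False; break
def rsInnerA (pat txt : List Char) (N i : Nat) : List Nat → Bool
  | [] => true
  | j :: js =>
    if txt.getD ((i + j) % N) ' ' ≠ pat.getD j ' ' then false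
    else rsInnerA pat txt N i js

-- outer loop: for i in range(N): … if match: return True
def rsOuterA (pat txt : List Char) (M N : Nat) : List Nat → Bool
  | [] => false
  | i :: is =>
    if rsInnerA pat txt N i (List.range M) then true
    else rsOuterA pat txt M N is

def rotary_searchL (pat txt : List Char) : Bool :=
  rsOuterA pat txt pat.length txt.length (List.range txt.length)

def rotary_search (pat : String) (txt : String) : Bool :=
  rotary_searchL pat.toList txt.toList

-- ===== PORT B =====
-- 'pat in ext': Python substring containment, scanned over all start positions
def pyContains (needle hay : List Char) : Bool :=
  (List.range (hay.length + 1 - needle.length)).any (fun i => needle.isPrefixOf (hay.drop i))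

-- ext = (txt * (2 + m // n))[:n + m - 1]
def rotary_search_altL (pat txt : List Char) : Bool :=
  if txt.length = 0 then false
  else
    pyContains pat
      ((List.flatten (List.replicate (2 + pat.length / txt.length) txt)).take
        (txt.length + pat.length - 1))

def rotary_search_alt (pat : String) (txt : String) : Bool :=
  rotary_search_altL pat.toList txt.toList

-- ===== PRECONDITION & SPEC =====
def Spec_rotary_search (pat : String) (txt : String) (out : Bool) : Prop := out = rotary_search_alt pat txt
instance (pat : String) (txt : String) (out : Bool) : Decidable (Spec_rotary_search pat txt out) := by unfold Spec_rotary_search; infer_instance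

-- ===== CLAIM (what is proved, stated in full; the proofs are below) =====
def Claim_equal_rotary_search : Prop := ∀ (pat : String) (txt : String), Dom_rotary_search pat txt → Spec_rotary_search pat txt (rotary_search pat txt)

-- ===== LEMMAS AND PROOFS =====

lemma rsInnerA_iff (pat txt : List Char) (N i : Nat) (js : List Nat) :
    rsInnerA pat txt N i js = true ↔
      ∀ j ∈ js, txt.getD ((i + j) % N) ' ' = pat.getD j ' ' := by
  induction js with
  | nil => simp [rsInnerA]
  | cons j js ih =>
    simp only [rsInnerA]
    split_ifs with h
    · simp only [false_iff]
      intro hall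
      exact h (hall j (List.mem_cons_self))
    · push_neg at h
      rw [ih]
      constructor
      · intro hall j' hj'
        rcases List.mem_cons.mp hj' with rfl | hmem
        · exact h
        · exact hall j' hmem
      · intro hall j' hj'
        exact hall j' (List.mem_cons_of_mem _ hj')

lemma rsOuterA_iff (pat txt : List Char) (M N : Nat) (is : List Nat) :
    rsOuterA pat txt M N is = true ↔
      ∃ i ∈ is, rsInnerA pat txt N i (List.range M) = true := by
  induction is with
  | nil => simp [rsOuterA]
  | cons i is ih =>
    simp only [rsOuterA]
    split_ifs with h
    · simp [h]
    · simp [ih, h]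

lemma flatten_replicate_getD (l : List Char) (_hl : 0 < l.length) :
    ∀ (k t : Nat), t < k * l.length →
      (List.flatten (List.replicate k l)).getD t ' ' = l.getD (t % l.length) ' ' := by
  intro k
  induction k with
  | zero => intro t ht; omega
  | succ k ih =>
    intro t ht
    rw [List.replicate_succ, List.flatten_cons]
    by_cases h : t < l.length
    · rw [List.getD_append _ _ _ _ h, Nat.mod_eq_of_lt h]
    · push_neg at h
      have hsm : (k + 1) * l.length = k * l.length + l.length := Nat.succ_mul _ _
      rw [List.getD_append_right _ _ _ _ h, ih (t - l.length) (by omega),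
        Nat.mod_eq_sub_mod h]

lemma isPrefixOf_iff_getD (p : List Char) :
    ∀ (l : List Char), p.length ≤ l.length →
      (p.isPrefixOf l = true ↔ ∀ j < p.length, l.getD j ' ' = p.getD j ' ') := by
  induction p with
  | nil => intro l _; simp [List.isPrefixOf]
  | cons a p ih =>
    intro l hlen
    cases l with
    | nil => simp at hlen
    | cons b l =>
      simp only [List.isPrefixOf, List.length_cons] at *
      rw [Bool.and_eq_true, beq_iff_eq, ih l (by omega)]
      constructor
      · rintro ⟨hab, hrest⟩ j hj
        cases j with
        | zero => simp [hab]
        | succ j => simpa using hrest j (by omega)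
      · intro h
        refine ⟨by simpa using (h 0 (by omega)).symm, fun j hj => ?_⟩
        simpa using h (j + 1) (by omega)

lemma getD_drop_add (l : List Char) (i j : Nat) (h : i + j < l.length) :
    (l.drop i).getD j ' ' = l.getD (i + j) ' ' := by
  rw [List.getD_eq_getElem _ _ (by simp; omega), List.getD_eq_getElem _ _ h,
    List.getElem_drop]

lemma getD_take (l : List Char) (c t : Nat) (ht : t < c) :
    (l.take c).getD t ' ' = l.getD t ' ' := by
  simp [List.getD_eq_getElem?_getD, ht]

-- main equivalence on the underlying character lists, nonempty txt
lemma mainL (pat txt : List Char) (hn : 0 < txt.length) :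
    rotary_searchL pat txt = rotary_search_altL pat txt := by
  have hrep : txt.length + pat.length ≤ (2 + pat.length / txt.length) * txt.length := by
    have hdm := Nat.div_add_mod pat.length txt.length
    have hlt : pat.length % txt.length < txt.length := Nat.mod_lt _ hn
    have hexp : (2 + pat.length / txt.length) * txt.length
        = 2 * txt.length + txt.length * (pat.length / txt.length) := by ring
    omega
  have hflatlen :
      (List.flatten (List.replicate (2 + pat.length / txt.length) txt)).length
        = (2 + pat.length / txt.length) * txt.length := by
    simp [List.length_flatten, Nat.mul_comm]
  obtain ⟨ext, hext⟩ : ∃ e, (List.flatten (List.replicate (2 + pat.length / txt.length) txt)).take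
      (txt.length + pat.length - 1) = e := ⟨_, rfl⟩
  have hextlen : ext.length = txt.length + pat.length - 1 := by
    rw [← hext, List.length_take, hflatlen]; omega
  have hextD : ∀ t, t < txt.length + pat.length - 1 →
      ext.getD t ' ' = txt.getD (t % txt.length) ' ' := by
    intro t ht
    rw [← hext, getD_take _ _ _ ht, flatten_replicate_getD txt hn _ t (by omega)]
  have hB : rotary_search_altL pat txt = true ↔
      ∃ i < txt.length, ∀ j < pat.length, ext.getD (i + j) ' ' = pat.getD j ' ' := by
    rw [rotary_search_altL, if_neg (by omega), hext]
    clear hrep hflatlen hext hextD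
    simp only [pyContains, List.any_eq_true, List.mem_range, hextlen]
    have hrange : txt.length + pat.length - 1 + 1 - pat.length = txt.length := by omega
    rw [hrange]
    constructor
    · rintro ⟨i, hi, hp⟩
      refine ⟨i, hi, ?_⟩
      have hlen : pat.length ≤ (ext.drop i).length := by
        rw [List.length_drop, hextlen]; omega
      rw [isPrefixOf_iff_getD _ _ hlen] at hp
      intro j hj
      rw [← getD_drop_add ext i j (by omega)]
      exact hp j hj
    · rintro ⟨i, hi, h⟩
      refine ⟨i, hi, ?_⟩
      have hlen : pat.length ≤ (ext.drop i).length := by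
        rw [List.length_drop, hextlen]; omega
      rw [isPrefixOf_iff_getD _ _ hlen]
      intro j hj
      rw [getD_drop_add ext i j (by omega)]
      exact h j hj
  clear hrep hflatlen hext
  rw [Bool.eq_iff_iff]
  have hA : rotary_searchL pat txt = true ↔
      ∃ i < txt.length, ∀ j < pat.length,
        txt.getD ((i + j) % txt.length) ' ' = pat.getD j ' ' := by
    rw [rotary_searchL, rsOuterA_iff]
    constructor
    · rintro ⟨i, hi, h⟩
      rw [rsInnerA_iff] at h
      exact ⟨i, List.mem_range.mp hi, fun j hj => h j (List.mem_range.mpr hj)⟩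
    · rintro ⟨i, hi, h⟩
      refine ⟨i, List.mem_range.mpr hi, ?_⟩
      rw [rsInnerA_iff]
      exact fun j hj => h j (List.mem_range.mp hj)
  rw [hA, hB]
  constructor
  · rintro ⟨i, hi, h⟩
    refine ⟨i, hi, fun j hj => ?_⟩
    have ht : i + j < txt.length + pat.length - 1 := by
      clear hextD hA hB h hextlen ext; omega
    rw [hextD (i + j) ht]; exact h j hj
  · rintro ⟨i, hi, h⟩
    refine ⟨i, hi, fun j hj => ?_⟩
    have ht : i + j < txt.length + pat.length - 1 := by
      clear hextD hA hB h hextlen ext; omega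
    rw [← hextD (i + j) ht]; exact h j hj

lemma mainL_all (pat txt : List Char) :
    rotary_searchL pat txt = rotary_search_altL pat txt := by
  by_cases hn : 0 < txt.length
  · exact mainL pat txt hn
  · have h0 : txt.length = 0 := by omega
    rw [rotary_searchL, rotary_search_altL, if_pos h0, h0]
    simp [rsOuterA]

-- ===== VERDICT (by name: the statement is the Claim_ definition above) =====
theorem rotary_search_spec : Claim_equal_rotary_search := by
  intro pat txt _
  unfold Spec_rotary_search rotary_search rotary_search_alt
  exact mainL_all pat.toList txt.toList
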